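-- pv_equiv track=rewrite | github.com/Mon-ius/Compiling-principle | 03_Priority-analysis-table-and-function/app/core.py | check
-- ===== SOURCE A (Python) =====
-- def _find(x,fa):
--     if x not in fa.keys():
--         return x
--     if x == fa[x]:
--         return x
--     else:
--
--         return _find(fa[x],fa)
--
-- def _check(x,y,fa):
--     if _find(x, fa) == _find(y,fa):
--         return True
--     return False
--
-- def check(x,y,fa):
--
--     if not len(x) == len(y):
--         return False
--     for i in range(len(x)):
--         if x[i].isupper():
--             if not _check(x[i],y[i],fa):
--                 return False
--         else:
--             if not x[i] == y[i]:
--                 return False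
--     return True
-- ===== SOURCE B (Python) =====
-- def check(x, y, fa):
--     if len(x) != len(y):
--         return False
--     memo = {}
--
--     def root(s):
--         if s in memo:
--             return memo[s]
--         t = s
--         while t in fa and t != fa[t]:
--             t = fa[t]
--         memo[s] = t
--         return t
--
--     return all(root(a) == root(b) if a.isupper() else a == b
--                for a, b in zip(x, y))
-- ===== Notes on version B (the rewrite author's own statement) =====
-- stated objective: alternative
-- what changed: Replaces the recursive _find/_check helper pair and the index loop with a single zip/all pass that resolves each symbol's root by an iterative parent-chain walk cached in a memo dict, so each distinct symbol's chain is walked at most once.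
import Mathlib
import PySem

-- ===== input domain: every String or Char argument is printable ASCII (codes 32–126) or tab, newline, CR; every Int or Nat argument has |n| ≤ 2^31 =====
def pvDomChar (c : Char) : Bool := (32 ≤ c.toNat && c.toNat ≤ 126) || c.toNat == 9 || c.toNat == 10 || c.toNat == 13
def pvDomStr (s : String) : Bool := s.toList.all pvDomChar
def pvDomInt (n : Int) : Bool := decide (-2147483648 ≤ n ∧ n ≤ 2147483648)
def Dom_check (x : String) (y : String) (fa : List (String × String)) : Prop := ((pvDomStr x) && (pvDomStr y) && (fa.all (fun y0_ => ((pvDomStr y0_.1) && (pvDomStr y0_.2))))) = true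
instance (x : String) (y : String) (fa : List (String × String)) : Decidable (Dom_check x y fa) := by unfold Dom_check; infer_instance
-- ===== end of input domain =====

-- B replaces the recursive _find/_check pair and the index loop by one zip/all pass with an
-- iterative root walk memoised in a dict (objective: alternative decomposition, same cost).

-- ===== PORT A =====
-- _find(x, fa): tail recursion on the parent chain; the fuel fa.length+1 only totalises it
-- (on an acyclic table every chain stabilises within fa.length steps, so the fuel is never exhausted;
-- on a cyclic table the Python recurses without bound).
def pvFindA (d : PySem.Dict String String) : Nat → String → String
  | 0, s => s
  | n + 1, s =>
    match d.get? s with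
    | none => s
    | some p => if s = p then s else pvFindA d n p

-- _check(x, y, fa)
def pvCheck2A (d : PySem.Dict String String) (fuel : Nat) (a b : String) : Bool :=
  if pvFindA d fuel a = pvFindA d fuel b then true else false

-- the 'for i in range(len(x))' loop with its early returns, walking both strings in step
def pvLoopA (d : PySem.Dict String String) (fuel : Nat) : List Char → List Char → Bool
  | [], _ => true
  | _ :: _, [] => true      -- unreachable: the loop only runs after the length check
  | c :: cs, e :: es =>
    if PySem.Chars.isupper c then
      if !pvCheck2A d fuel (String.mk [c]) (String.mk [e]) then false else pvLoopA d fuel cs es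
    else
      if !(c = e : Bool) then false else pvLoopA d fuel cs es

def check (x : String) (y : String) (fa : List (String × String)) : Bool :=
  if !(PySem.Str.len x == PySem.Str.len y) then false
  else pvLoopA (PySem.Dict.ofList fa) (fa.length + 1) x.toList y.toList

-- ===== PORT B =====
-- the 'while t in fa and t != fa[t]: t = fa[t]' walk; same totalising fuel as A's port
def pvWalkB (d : PySem.Dict String String) : Nat → String → String
  | 0, t => t
  | n + 1, t =>
    if d.contains t && !(t == d.getD t t) then pvWalkB d n (d.getD t t) else t

-- root(s): memo lookup, else walk the chain and record the result
def pvRootB (d : PySem.Dict String String) (fuel : Nat) (memo : PySem.Dict String String)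
    (s : String) : String × PySem.Dict String String :=
  match memo.get? s with
  | some t => (t, memo)
  | none =>
    let t := pvWalkB d fuel s
    (t, memo.insert s t)

-- all(root(a) == root(b) if a.isupper() else a == b for a, b in zip(x, y)), threading the memo
def pvAllB (d : PySem.Dict String String) (fuel : Nat) :
    PySem.Dict String String → List (Char × Char) → Bool
  | _, [] => true
  | memo, (a, b) :: rest =>
    if PySem.Chars.isupper a then
      let (ra, m1) := pvRootB d fuel memo (String.mk [a])
      let (rb, m2) := pvRootB d fuel m1 (String.mk [b])
      (ra == rb) && pvAllB d fuel m2 rest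
    else
      (a == b) && pvAllB d fuel memo rest

def check_alt (x : String) (y : String) (fa : List (String × String)) : Bool :=
  if PySem.Str.len x ≠ PySem.Str.len y then false
  else pvAllB (PySem.Dict.ofList fa) (fa.length + 1) PySem.Dict.empty (x.toList.zip y.toList)

-- ===== PRECONDITION & SPEC =====
def Spec_check (x : String) (y : String) (fa : List (String × String)) (out : Bool) : Prop := out = check_alt x y fa
instance (x : String) (y : String) (fa : List (String × String)) (out : Bool) : Decidable (Spec_check x y fa out) := by unfold Spec_check; infer_instance

-- ===== CLAIM (what is proved, stated in full; the proofs are below) =====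
def Claim_equal_check : Prop := ∀ (x : String) (y : String) (fa : List (String × String)), Dom_check x y fa → Spec_check x y fa (check x y fa)

-- ===== LEMMAS AND PROOFS =====

-- the iterative walk of B computes exactly A's recursive _find, fuel for fuel
theorem pvWalkB_eq_pvFindA (d : PySem.Dict String String) :
    ∀ (n : Nat) (s : String), pvWalkB d n s = pvFindA d n s := by
  intro n
  induction n with
  | zero => intro s; rfl
  | succ n ih =>
    intro s
    simp only [pvWalkB, pvFindA]
    rw [PySem.Dict.contains_eq_isSome_get?]
    cases h : d.get? s with
    | none => simp
    | some p =>
      have hD : d.getD s s = p := PySem.Dict.getD_of_get?_eq_some d s h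
      by_cases hsp : s = p
      · subst hsp; simp [hD]
      · simp [hD, hsp, ih]

-- memo soundness: every recorded root is the walk's value
def pvMemoOK (d : PySem.Dict String String) (fuel : Nat) (memo : PySem.Dict String String) : Prop :=
  ∀ s t, memo.get? s = some t → t = pvWalkB d fuel s

theorem pvRootB_eq (d : PySem.Dict String String) (fuel : Nat) (memo : PySem.Dict String String)
    (s : String) (h : pvMemoOK d fuel memo) :
    (pvRootB d fuel memo s).1 = pvWalkB d fuel s ∧ pvMemoOK d fuel (pvRootB d fuel memo s).2 := by
  unfold pvRootB
  cases hm : memo.get? s with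
  | some t => exact ⟨h s t hm, by simpa [hm] using h⟩
  | none =>
    refine ⟨rfl, ?_⟩
    intro u v hv
    simp only at hv
    by_cases hus : u = s
    · rw [hus] at hv
      rw [PySem.Dict.get?_insert_self memo s] at hv
      rw [hus]
      exact (Option.some.inj hv).symm
    · rw [PySem.Dict.get?_insert_of_ne memo (pvWalkB d fuel s) hus] at hv
      exact h u v hv

-- the zip/all pass of B equals A's index loop, for any memo satisfying the invariant
theorem pvAllB_eq_pvLoopA (d : PySem.Dict String String) (fuel : Nat) :
    ∀ (cs es : List Char) (memo : PySem.Dict String String), pvMemoOK d fuel memo →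
      pvAllB d fuel memo (cs.zip es) = pvLoopA d fuel cs es := by
  intro cs
  induction cs with
  | nil => intro es memo _; cases es <;> rfl
  | cons c cs ih =>
    intro es memo hmemo
    cases es with
    | nil => rfl
    | cons e es =>
      simp only [List.zip_cons_cons, pvAllB, pvLoopA]
      by_cases hup : PySem.Chars.isupper c = true
      · obtain ⟨h1, hm1⟩ := pvRootB_eq d fuel memo (String.mk [c]) hmemo
        obtain ⟨h2, hm2⟩ := pvRootB_eq d fuel (pvRootB d fuel memo (String.mk [c])).2 (String.mk [e]) hm1
        simp only [hup, if_true]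
        rw [ih es _ hm2]
        simp only [h1, h2, pvCheck2A, pvWalkB_eq_pvFindA]
        by_cases heq : pvFindA d fuel (String.mk [c]) = pvFindA d fuel (String.mk [e])
        · simp [heq]
        · simp [heq]
      · simp only [hup, if_false, Bool.false_eq_true]
        rw [ih es memo hmemo]
        by_cases hce : c = e
        · simp [hce]
        · simp [hce]

-- ===== VERDICT (by name: the statement is the Claim_ definition above) =====
theorem check_spec : Claim_equal_check := by
  intro x y fa _
  unfold Spec_check check check_alt
  have hmemo : pvMemoOK (PySem.Dict.ofList fa) (fa.length + 1) PySem.Dict.empty := by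
    intro s t h; simp [PySem.Dict.get?_empty] at h
  rw [pvAllB_eq_pvLoopA _ _ x.toList y.toList _ hmemo]
  by_cases h : PySem.Str.len x = PySem.Str.len y <;> simp [h]
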